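-- pv_equiv track=rewrite | github.com/migdaepp/botplotlib | botplotlib/refactor/from_matplotlib.py | _parse_format_string
-- ===== SOURCE A (Python) =====
-- _FMT_COLOR_MAP: dict[str, str] = {
--     "b": "#1f77b4",  # blue
--     "g": "#2ca02c",  # green
--     "r": "#d62728",  # red
--     "c": "#17becf",  # cyan
--     "m": "#9467bd",  # magenta
--     "y": "#bcbd22",  # yellow
--     "k": "#000000",  # black
--     "w": "#ffffff",  # white
-- }
--
-- _FMT_MARKER_CHARS = set(".,ov^<>1234sp*hH+xXDd|_")
--
-- _FMT_LINESTYLES = ["--", "-.", ":", "-"]  # ordered longest-first for matching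
--
-- def _parse_format_string(fmt: str) -> dict[str, str | None]:
--     """Parse a matplotlib format string like 'ro--' into components.
--
--     Returns a dict with keys: color, marker, linestyle (any may be None).
--     """
--     result: dict[str, str | None] = {"color": None, "marker": None, "linestyle": None}
--     remaining = fmt
--
--     # Extract color (single char at start)
--     if remaining and remaining[0] in _FMT_COLOR_MAP:
--         result["color"] = _FMT_COLOR_MAP[remaining[0]]
--         remaining = remaining[1:]
--
--     # Extract marker (single char)
--     if remaining and remaining[0] in _FMT_MARKER_CHARS:
--         result["marker"] = remaining[0]
--         remaining = remaining[1:]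
--
--     # Extract linestyle
--     for ls in _FMT_LINESTYLES:
--         if remaining.startswith(ls):
--             result["linestyle"] = ls
--             remaining = remaining[len(ls) :]
--             break
--
--     return result
-- ===== SOURCE B (Python) =====
-- import re
--
-- _FMT_COLOR_MAP = {
--     "b": "#1f77b4",
--     "g": "#2ca02c",
--     "r": "#d62728",
--     "c": "#17becf",
--     "m": "#9467bd",
--     "y": "#bcbd22",
--     "k": "#000000",
--     "w": "#ffffff",
-- }
--
-- # One anchored regex: optional color class, optional marker class, optional
-- # linestyle alternation (longest-first so '--' and '-.' win over '-').
-- _FMT_RE = re.compile(r"([bgrcmykw])?([.,ov^<>1234sp*hH+xXDd|_])?(--|-\.|:|-)?")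
--
--
-- def _parse_format_string(fmt: str):
--     m = _FMT_RE.match(fmt)
--     return {
--         "color": _FMT_COLOR_MAP.get(m.group(1)),
--         "marker": m.group(2),
--         "linestyle": m.group(3),
--     }
-- ===== Notes on version B (the rewrite author's own statement) =====
-- stated objective: idiomatic
-- what changed: Replaces A's mutable result-dict and stepwise consumption of a shrinking suffix (two membership-tested head chops plus a longest-first candidate loop for the linestyle) with a single anchored compiled regex of three optional capture groups; the result dict is built once from the three captures, with the color capture mapped through the color dict.
import Mathlib
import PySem

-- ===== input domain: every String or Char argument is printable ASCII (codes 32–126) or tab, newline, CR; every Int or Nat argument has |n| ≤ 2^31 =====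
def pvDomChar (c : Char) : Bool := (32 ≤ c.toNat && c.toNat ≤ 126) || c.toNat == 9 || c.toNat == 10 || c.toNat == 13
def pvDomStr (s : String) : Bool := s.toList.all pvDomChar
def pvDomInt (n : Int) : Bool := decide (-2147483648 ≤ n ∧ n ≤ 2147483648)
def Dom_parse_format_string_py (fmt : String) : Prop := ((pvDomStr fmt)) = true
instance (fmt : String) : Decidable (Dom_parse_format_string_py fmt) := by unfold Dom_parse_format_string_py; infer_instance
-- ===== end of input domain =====

-- B replaces A's mutable result-dict and stepwise suffix consumption by one anchored
-- regex of three optional capture groups, building the dict once from the captures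
-- (objective: idiomatic).

-- ===== PORT A =====
-- Python string ops are ported on code points (PySem.Chars view); remaining[0] is the head char.
def pvAColorMap : PySem.Dict Char String :=
  PySem.Dict.ofList [('b', "#1f77b4"), ('g', "#2ca02c"), ('r', "#d62728"), ('c', "#17becf"),
   ('m', "#9467bd"), ('y', "#bcbd22"), ('k', "#000000"), ('w', "#ffffff")]

def pvAMarkerSet : PySem.Set Char := PySem.Set.ofList ".,ov^<>1234sp*hH+xXDd|_".toList

def pvALinestyles : List (List Char) := ["--".toList, "-.".toList, ":".toList, "-".toList]

-- for ls in _FMT_LINESTYLES: if remaining.startswith(ls): … break  (remaining unused afterwards)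
def pvALsLoop (lss : List (List Char)) (remaining : List Char) : Option (List Char) :=
  match lss with
  | [] => none
  | ls :: rest =>
      if PySem.Chars.startswith remaining ls then some ls else pvALsLoop rest remaining

def parse_format_string_py (fmt : String) : List (String × Option String) :=
  let result : PySem.Dict String (Option String) :=
    PySem.Dict.ofList [("color", none), ("marker", none), ("linestyle", none)]
  let remaining := fmt.toList
  -- if remaining and remaining[0] in _FMT_COLOR_MAP: …
  let (result, remaining) :=
    if remaining ≠ [] ∧ (PySem.Dict.get? pvAColorMap (remaining.headD ' ')).isSome then
      (PySem.Dict.insert result "color" (PySem.Dict.get? pvAColorMap (remaining.headD ' ')),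
       PySem.List.slice remaining (some 1) none)
    else (result, remaining)
  -- if remaining and remaining[0] in _FMT_MARKER_CHARS: …
  let (result, remaining) :=
    if remaining ≠ [] ∧ PySem.Set.contains pvAMarkerSet (remaining.headD ' ') = true then
      (PySem.Dict.insert result "marker" (some (String.ofList [remaining.headD ' '])),
       PySem.List.slice remaining (some 1) none)
    else (result, remaining)
  let result :=
    match pvALsLoop pvALinestyles remaining with
    | some ls => PySem.Dict.insert result "linestyle" (some (String.ofList ls))
    | none => result
  result.items

-- ===== PORT B =====
-- Source B matches the compiled anchored regex  ([bgrcmykw])?([.,ov^<>1234sp*hH+xXDd|_])?(--|-\.|:|-)?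
-- against fmt (re.match) and reads the three captures. PySem has no regex, so the match is
-- hand-ported exactly: every group of this pattern is optional and the pattern has no end
-- anchor, so re's leftmost greedy match never backtracks — it is exactly: each optional
-- group greedily consumes its match at the current position (a char-class group one class
-- char, the alternation group its first matching alternative, tried in pattern order).

-- `(<class>)?` at position cs: greedy optional single-char class group.
def reOptClass (cls : List Char) (cs : List Char) : Option Char × List Char :=
  match cs with
  | c :: rest => if cls.contains c then (some c, rest) else (none, cs)
  | [] => (none, cs)

-- `(a1|a2|…)?` at position cs: first alternative (in pattern order) that matches here.
def reOptAlts (alts : List (List Char)) (cs : List Char) : Option (List Char) × List Char :=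
  match alts with
  | [] => (none, cs)
  | a :: rest =>
      if cs.take a.length = a then (some a, cs.drop a.length) else reOptAlts rest cs

def pvBColorMap : PySem.Dict String String :=
  PySem.Dict.ofList [("b", "#1f77b4"), ("g", "#2ca02c"), ("r", "#d62728"), ("c", "#17becf"),
   ("m", "#9467bd"), ("y", "#bcbd22"), ("k", "#000000"), ("w", "#ffffff")]

def parse_format_string_py_alt (fmt : String) : List (String × Option String) :=
  let (g1, r1) := reOptClass "bgrcmykw".toList fmt.toList
  let (g2, r2) := reOptClass ".,ov^<>1234sp*hH+xXDd|_".toList r1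
  let (g3, _)  := reOptAlts ["--".toList, "-.".toList, ":".toList, "-".toList] r2
  [("color", g1.bind (fun c => PySem.Dict.get? pvBColorMap (String.ofList [c]))),
   ("marker", g2.map (fun c => String.ofList [c])),
   ("linestyle", g3.map String.ofList)]

-- ===== PRECONDITION & SPEC =====
def Spec_parse_format_string_py (fmt : String) (out : List (String × Option String)) : Prop := out = parse_format_string_py_alt fmt
instance (fmt : String) (out : List (String × Option String)) : Decidable (Spec_parse_format_string_py fmt out) := by unfold Spec_parse_format_string_py; infer_instance

-- ===== CLAIM (what is proved, stated in full; the proofs are below) =====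
def Claim_equal_parse_format_string_py : Prop := ∀ (fmt : String), Dom_parse_format_string_py fmt → Spec_parse_format_string_py fmt (parse_format_string_py fmt)

-- ===== LEMMAS AND PROOFS =====
theorem color_lookup_eq (c : Char) :
    ((if ("bgrcmykw".toList).contains c then some c else none).bind
      (fun c => PySem.Dict.get? pvBColorMap (String.ofList [c])))
    = PySem.Dict.get? pvAColorMap c := by
  by_cases h : ("bgrcmykw".toList).contains c = true
  · have : c = 'b' ∨ c = 'g' ∨ c = 'r' ∨ c = 'c' ∨ c = 'm' ∨ c = 'y' ∨ c = 'k' ∨ c = 'w' := by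
      simpa using h
    rcases this with rfl | rfl | rfl | rfl | rfl | rfl | rfl | rfl <;> decide
  · have hs : (¬c = 'b') ∧ (¬c = 'g') ∧ (¬c = 'r') ∧ (¬c = 'c') ∧ (¬c = 'm') ∧ (¬c = 'y') ∧ (¬c = 'k') ∧ (¬c = 'w') := by
      simpa using h
    obtain ⟨h1, h2, h3, h4, h5, h6, h7, h8⟩ := hs
    rw [show pvAColorMap = PySem.Dict.mk [('b', "#1f77b4"), ('g', "#2ca02c"), ('r', "#d62728"),
      ('c', "#17becf"), ('m', "#9467bd"), ('y', "#bcbd22"), ('k', "#000000"), ('w', "#ffffff")]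
      from by decide]
    simp [Ne.symm h1, Ne.symm h2, Ne.symm h3, Ne.symm h4, Ne.symm h5, Ne.symm h6,
      Ne.symm h7, Ne.symm h8, PySem.Dict.get?]
    exact fun hd => absurd hd (by simp [h1, h2, h3, h4, h5, h6, h7, h8])

theorem color_some_iff (c : Char) :
    ("bgrcmykw".toList).contains c = (PySem.Dict.get? pvAColorMap c).isSome := by
  rw [← color_lookup_eq c]
  by_cases h : ("bgrcmykw".toList).contains c = true
  · have : c = 'b' ∨ c = 'g' ∨ c = 'r' ∨ c = 'c' ∨ c = 'm' ∨ c = 'y' ∨ c = 'k' ∨ c = 'w' := by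
      simpa using h
    rcases this with rfl | rfl | rfl | rfl | rfl | rfl | rfl | rfl <;> decide
  · have hs : (¬c = 'b') ∧ (¬c = 'g') ∧ (¬c = 'r') ∧ (¬c = 'c') ∧ (¬c = 'm') ∧ (¬c = 'y') ∧ (¬c = 'k') ∧ (¬c = 'w') := by
      simpa using h
    obtain ⟨h1, h2, h3, h4, h5, h6, h7, h8⟩ := hs
    simp [h1, h2, h3, h4, h5, h6, h7, h8]

theorem marker_contains_eq (c : Char) :
    PySem.Set.contains pvAMarkerSet c = (".,ov^<>1234sp*hH+xXDd|_".toList).contains c := by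
  rw [show pvAMarkerSet = ".,ov^<>1234sp*hH+xXDd|_".toList from by decide]
  simp

theorem ls_eq (r : List Char) :
    pvALsLoop pvALinestyles r = (reOptAlts pvALinestyles r).1 := by
  have key : ∀ (cs a : List Char), (PySem.Chars.startswith cs a = true) = (cs.take a.length = a) := by
    intro cs a
    rw [PySem.Chars.startswith_iff cs a, eq_iff_iff, List.prefix_iff_eq_take, eq_comm]
  have gen : ∀ (alts : List (List Char)), pvALsLoop alts r = (reOptAlts alts r).1 := by
    intro alts
    induction alts with
    | nil => rfl
    | cons a rest ih =>
        simp only [pvALsLoop, reOptAlts, key r a]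
        split_ifs <;> simp [ih]
  exact gen pvALinestyles

theorem stage_ls (col mk : Option String) (r : List Char) :
    (match pvALsLoop pvALinestyles r with
     | some ls =>
         PySem.Dict.insert
           (PySem.Dict.ofList [("color", col), ("marker", mk), ("linestyle", none)])
           "linestyle" (some (String.ofList ls))
     | none => PySem.Dict.ofList [("color", col), ("marker", mk), ("linestyle", none)]).items
    = [("color", col), ("marker", mk),
       ("linestyle", ((reOptAlts pvALinestyles r).1).map String.ofList)] := by
  rw [← ls_eq r]
  cases pvALsLoop pvALinestyles r with
  | none => rfl
  | some ls => rfl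

theorem stage_marker (col : Option String) (r : List Char) :
    (let result : PySem.Dict String (Option String) :=
       PySem.Dict.ofList [("color", col), ("marker", none), ("linestyle", none)]
     let (result, remaining) :=
       if r ≠ [] ∧ PySem.Set.contains pvAMarkerSet (r.headD ' ') = true then
         (PySem.Dict.insert result "marker" (some (String.ofList [r.headD ' '])),
          PySem.List.slice r (some 1) none)
       else (result, r)
     (match pvALsLoop pvALinestyles remaining with
      | some ls => PySem.Dict.insert result "linestyle" (some (String.ofList ls))
      | none => result).items)
    = (let (g2, r2) := reOptClass ".,ov^<>1234sp*hH+xXDd|_".toList r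
       [("color", col), ("marker", g2.map (fun c => String.ofList [c])),
        ("linestyle", ((reOptAlts pvALinestyles r2).1).map String.ofList)]) := by
  rcases r with _ | ⟨c, r⟩
  · simpa [reOptClass] using stage_ls col none []
  · by_cases hm : (".,ov^<>1234sp*hH+xXDd|_".toList).contains c = true
    · simp only [reOptClass, ne_eq, reduceCtorEq, not_false_eq_true,
        List.headD_cons, marker_contains_eq, hm, and_self, if_true, PySem.List.slice_from_one,
        List.tail_cons]
      simpa using stage_ls col (some (String.ofList [c])) r
    · simp only [reOptClass, ne_eq, reduceCtorEq, not_false_eq_true,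
        List.headD_cons, marker_contains_eq, hm, and_false, if_false]
      simpa using stage_ls col none (c :: r)

theorem insert_color (v : String) :
    (PySem.Dict.ofList [("color", (none : Option String)), ("marker", none), ("linestyle", none)]).insert
      "color" (some v)
    = PySem.Dict.ofList [("color", some v), ("marker", none), ("linestyle", none)] := rfl

theorem core_eq (cs : List Char) :
    (let result : PySem.Dict String (Option String) :=
       PySem.Dict.ofList [("color", none), ("marker", none), ("linestyle", none)]
     let (result, remaining) :=
       if cs ≠ [] ∧ (PySem.Dict.get? pvAColorMap (cs.headD ' ')).isSome then
         (PySem.Dict.insert result "color" (PySem.Dict.get? pvAColorMap (cs.headD ' ')),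
          PySem.List.slice cs (some 1) none)
       else (result, cs)
     let (result, remaining) :=
       if remaining ≠ [] ∧ PySem.Set.contains pvAMarkerSet (remaining.headD ' ') = true then
         (PySem.Dict.insert result "marker" (some (String.ofList [remaining.headD ' '])),
          PySem.List.slice remaining (some 1) none)
       else (result, remaining)
     (match pvALsLoop pvALinestyles remaining with
      | some ls => PySem.Dict.insert result "linestyle" (some (String.ofList ls))
      | none => result).items)
    = (let (g1, r1) := reOptClass "bgrcmykw".toList cs
       let (g2, r2) := reOptClass ".,ov^<>1234sp*hH+xXDd|_".toList r1
       let (g3, _)  := reOptAlts pvALinestyles r2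
       [("color", g1.bind (fun c => PySem.Dict.get? pvBColorMap (String.ofList [c]))),
        ("marker", g2.map (fun c => String.ofList [c])),
        ("linestyle", g3.map String.ofList)]) := by
  rcases cs with _ | ⟨c, cs⟩
  · simpa [reOptClass] using stage_marker none []
  · by_cases hb : ("bgrcmykw".toList).contains c = true
    · have hsome : (PySem.Dict.get? pvAColorMap c).isSome = true := by
        rw [← color_some_iff]; exact hb
      obtain ⟨v, hv⟩ := Option.isSome_iff_exists.1 hsome
      have hbind : PySem.Dict.get? pvBColorMap (String.ofList [c]) = some v := by
        have := color_lookup_eq c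
        rw [hb] at this
        simpa [hv] using this
      have hcolor : reOptClass "bgrcmykw".toList (c :: cs) = (some c, cs) := by
        have hd : c = 'b' ∨ c = 'g' ∨ c = 'r' ∨ c = 'c' ∨ c = 'm' ∨ c = 'y' ∨ c = 'k' ∨ c = 'w' := by
          simpa using hb
        simp [reOptClass, hd]
      rw [hcolor]
      have hc : c :: cs ≠ [] ∧ (pvAColorMap.get? ((c :: cs).headD ' ')).isSome = true := by
        simp [hv]
      simp only [if_pos hc]
      simp only [List.headD_cons]
      rw [hv, insert_color v]
      rw [show PySem.List.slice (c :: cs) (some 1) none = cs from by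
        simp [PySem.List.slice_from_one]]
      rw [Option.bind_some, hbind]
      exact stage_marker (some v) cs
    · have hb' : ("bgrcmykw".toList).contains c = false := by simpa using hb
      have hnone : PySem.Dict.get? pvAColorMap c = none := by
        have h2 := color_some_iff c
        rw [hb'] at h2
        exact Option.not_isSome_iff_eq_none.1 (by simp [← h2])
      have hcolor : reOptClass "bgrcmykw".toList (c :: cs) = (none, c :: cs) := by
        have hd : (¬c = 'b') ∧ (¬c = 'g') ∧ (¬c = 'r') ∧ (¬c = 'c') ∧ (¬c = 'm') ∧ (¬c = 'y') ∧ (¬c = 'k') ∧ (¬c = 'w') := by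
          simpa using hb'
        simp [reOptClass, hd.1, hd.2.1, hd.2.2.1, hd.2.2.2.1, hd.2.2.2.2.1, hd.2.2.2.2.2.1,
          hd.2.2.2.2.2.2.1, hd.2.2.2.2.2.2.2]
      rw [hcolor]
      have hc : ¬(c :: cs ≠ [] ∧ (pvAColorMap.get? ((c :: cs).headD ' ')).isSome = true) := by
        simp [hnone]
      simp only [if_neg hc]
      rw [show ((none : Option Char).bind fun a => PySem.Dict.get? pvBColorMap (String.ofList [a])) = none from rfl]
      exact stage_marker none (c :: cs)

-- ===== VERDICT (by name: the statement is the Claim_ definition above) =====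
theorem parse_format_string_py_spec : Claim_equal_parse_format_string_py := by
  intro fmt _
  unfold Spec_parse_format_string_py parse_format_string_py parse_format_string_py_alt
  exact core_eq fmt.toList
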